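-- pv_equiv track=rewrite | github.com/MrBrantCode/unitest_baseline | mut_generate/mist_train_taco/taco_16560/solution.py | can_form_circle
-- ===== SOURCE A (Python) =====
-- def can_form_circle(N, A):
--     def dfs(node, adj, vis):
--         vis[node] = 1
--         for i in adj[node]:
--             if not vis[i]:
--                 dfs(i, adj, vis)
--
--     def detect_cycle(src, adj, mark):
--         vis = [0] * 26
--         dfs(src, adj, vis)
--         for i in range(26):
--             if not vis[i] and mark[i] == 1:
--                 return 0
--         return 1
--
--     mark = [0] * 26
--     adj = [[] for _ in range(26)]
--     in_degree = [0] * 26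
--     out_degree = [0] * 26
--
--     for i in A:
--         u = ord(i[0]) - ord('a')
--         v = ord(i[-1]) - ord('a')
--         adj[u].append(v)
--         mark[u] = mark[v] = 1
--         in_degree[v] += 1
--         out_degree[u] += 1
--
--     for i in range(26):
--         if in_degree[i] != out_degree[i]:
--             return 0
--
--     return detect_cycle(ord(A[0][0]) - ord('a'), adj, mark)
-- ===== SOURCE B (Python) =====
-- def can_form_circle(N, A):
--     deg = [0] * 26            # out-degree minus in-degree per letter
--     seen = [False] * 26
--     for w in A:
--         u = ord(w[0]) - 97
--         v = ord(w[-1]) - 97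
--         deg[u] += 1
--         deg[v] -= 1
--         seen[u] = True
--         seen[v] = True
--     if any(deg):
--         return 0
--     vis = [False] * 26
--     vis[ord(A[0][0]) - 97] = True
--     for _ in range(26):       # label propagation to a fixpoint (<= 26 letters)
--         for w in A:
--             if vis[ord(w[0]) - 97]:
--                 vis[ord(w[-1]) - 97] = True
--     return 0 if any(seen[i] and not vis[i] for i in range(26)) else 1
-- ===== Notes on version B (the rewrite author's own statement) =====
-- stated objective: alternative
-- what changed: Replaces the adjacency list, recursive DFS and separate in/out degree arrays with a single out-minus-in degree balance array and an iterative 26-round label-propagation fixpoint computed directly over the word list (no adjacency structure, no recursion).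
import Mathlib
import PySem

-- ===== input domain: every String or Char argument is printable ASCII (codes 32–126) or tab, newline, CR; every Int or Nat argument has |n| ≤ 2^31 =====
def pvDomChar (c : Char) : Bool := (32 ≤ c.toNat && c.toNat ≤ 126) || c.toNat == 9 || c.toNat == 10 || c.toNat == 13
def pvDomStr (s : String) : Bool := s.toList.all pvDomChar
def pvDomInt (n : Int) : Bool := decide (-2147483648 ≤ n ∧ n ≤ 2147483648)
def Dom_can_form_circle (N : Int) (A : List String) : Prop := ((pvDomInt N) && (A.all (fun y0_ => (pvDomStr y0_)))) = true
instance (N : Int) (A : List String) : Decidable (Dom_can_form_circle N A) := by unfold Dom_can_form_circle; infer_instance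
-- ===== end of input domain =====

-- B replaces A's adjacency list + recursive DFS + separate in/out degree arrays by one
-- out-minus-in balance array and a 26-round label-propagation fixpoint over the word list;
-- the return values are proved equal on Pre_ (neither implementation observably mutates input).

-- shared tiny helper: the index ord(c)-97 under Python's negative-index wrap on a 26-list
def letterIdx (c : Char) : Fin 26 := ⟨(c.toNat + 26 - 97) % 26, Nat.mod_lt _ (by omega)⟩
def firstChar (w : String) : Char := w.toList.headD ' '
def lastChar (w : String) : Char := w.toList.getLastD ' '

-- ===== PORT A =====
-- loop body of A's first loop; state: (mark, adj, in_degree, out_degree), 26-element lists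
def stepAL (st : List Int × List (List (Fin 26)) × List Int × List Int) (w : String) :
    List Int × List (List (Fin 26)) × List Int × List Int :=
  let u := letterIdx (firstChar w)
  let v := letterIdx (lastChar w)
  ((st.1.set u.val 1).set v.val 1,
   st.2.1.set u.val ((st.2.1.getD u.val []) ++ [v]),
   st.2.2.1.set v.val ((st.2.2.1.getD v.val 0) + 1),
   st.2.2.2.set u.val ((st.2.2.2.getD u.val 0) + 1))

def buildAL (A : List String) : List Int × List (List (Fin 26)) × List Int × List Int :=
  A.foldl stepAL
    (List.replicate 26 0, List.replicate 26 [], List.replicate 26 0, List.replicate 26 0)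

-- recursive dfs; the fuel only makes the recursion structural (27 > 26 vertices, never exhausted)
def dfsGoL (adj : List (List (Fin 26))) : Nat → Fin 26 → List Int → List Int
  | 0, _, vis => vis
  | fuel+1, node, vis =>
      (adj.getD node.val []).foldl
        (fun v i => if v.getD i.val 0 = 0 then dfsGoL adj fuel i v else v)
        (vis.set node.val 1)

def detectCycleL (src : Fin 26) (adj : List (List (Fin 26))) (mark : List Int) : Int :=
  let vis := dfsGoL adj 27 src (List.replicate 26 0)
  if (List.finRange 26).any (fun i => vis.getD i.val 0 == 0 && mark.getD i.val 0 == 1) then 0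
  else 1

def can_form_circle (N : Int) (A : List String) : Int :=
  let st := buildAL A
  if (List.finRange 26).any (fun i => st.2.2.1.getD i.val 0 != st.2.2.2.getD i.val 0) then 0
  else detectCycleL (letterIdx (firstChar (A.headD ""))) st.2.1 st.1

-- ===== PORT B =====
-- loop body of B's first loop; state: (deg = out-in, seen), 26-element lists
def stepBL (st : List Int × List Bool) (w : String) : List Int × List Bool :=
  let u := letterIdx (firstChar w)
  let v := letterIdx (lastChar w)
  let d1 := st.1.set u.val ((st.1.getD u.val 0) + 1)
  (d1.set v.val ((d1.getD v.val 0) - 1),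
   (st.2.set u.val true).set v.val true)

def buildBL (A : List String) : List Int × List Bool :=
  A.foldl stepBL (List.replicate 26 0, List.replicate 26 false)

-- one propagation step / one full pass over the word list
def stepPL (v : List Bool) (w : String) : List Bool :=
  if v.getD (letterIdx (firstChar w)).val false then v.set (letterIdx (lastChar w)).val true
  else v

def passBL (A : List String) (vis : List Bool) : List Bool := A.foldl stepPL vis

def can_form_circle_alt (N : Int) (A : List String) : Int :=
  let st := buildBL A
  if (List.finRange 26).any (fun i => st.1.getD i.val 0 != 0) then 0
  else
    let vis0 := (List.replicate 26 false).set (letterIdx (firstChar (A.headD ""))).val true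
    let vis := (List.range 26).foldl (fun v _ => passBL A v) vis0
    if (List.finRange 26).any (fun i => st.2.getD i.val false && !(vis.getD i.val false)) then 0
    else 1

-- ===== PRECONDITION & SPEC =====
-- Pre_ excludes exactly the inputs where Python A raises IndexError: the empty list
-- (A[0]), an empty word (i[0]), or a word whose first/last char is outside ord 71..122
-- (index outside [-26,25] on a 26-list); chars with ord 71..96 wrap negatively and stay inside Pre_.
def Pre_can_form_circle (N : Int) (A : List String) : Prop :=
  A ≠ [] ∧ ∀ w ∈ A, w.toList ≠ [] ∧
    71 ≤ (w.toList.headD ' ').toNat ∧ (w.toList.headD ' ').toNat ≤ 122 ∧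
    71 ≤ (w.toList.getLastD ' ').toNat ∧ (w.toList.getLastD ' ').toNat ≤ 122
instance (N : Int) (A : List String) : Decidable (Pre_can_form_circle N A) := by
  unfold Pre_can_form_circle; infer_instance

def pvWitness_can_form_circle : Int × List String := (2, ["ab", "ba"])

def Spec_can_form_circle (N : Int) (A : List String) (out : Int) : Prop := out = can_form_circle_alt N A
instance (N : Int) (A : List String) (out : Int) : Decidable (Spec_can_form_circle N A out) := by unfold Spec_can_form_circle; infer_instance

-- ===== CLAIM (what is proved, stated in full; the proofs are below) =====
def Claim_equal_can_form_circle : Prop := ∀ (N : Int) (A : List String), Dom_can_form_circle N A → Pre_can_form_circle N A → Spec_can_form_circle N A (can_form_circle N A)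

-- ===== LEMMAS AND PROOFS =====

-- function-as-array update and a strict select, used by the proof-side functional models
def upd {α : Type} (f : Fin 26 → α) (j : Fin 26) (x : α) : Fin 26 → α :=
  fun i => if i = j then x else f i

def bselect {α : Type} : Bool → α → α → α
  | true, t, _ => t
  | false, _, e => e


-- ---------- functional models of the two programs (proof-side only) ----------
-- loop body of A's first loop; state: (mark, adj, in_degree, out_degree)
def stepA (st : (Fin 26 → Int) × (Fin 26 → List (Fin 26)) × (Fin 26 → Int) × (Fin 26 → Int))
    (w : String) :
    (Fin 26 → Int) × (Fin 26 → List (Fin 26)) × (Fin 26 → Int) × (Fin 26 → Int) :=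
  let u := letterIdx (firstChar w)
  let v := letterIdx (lastChar w)
  (upd (upd st.1 u 1) v 1,
   upd st.2.1 u (st.2.1 u ++ [v]),
   upd st.2.2.1 v (st.2.2.1 v + 1),
   upd st.2.2.2 u (st.2.2.2 u + 1))

def buildA (A : List String) :
    (Fin 26 → Int) × (Fin 26 → List (Fin 26)) × (Fin 26 → Int) × (Fin 26 → Int) :=
  A.foldl stepA ((fun _ => 0), (fun _ => []), (fun _ => 0), (fun _ => 0))

-- recursive dfs; the fuel only makes the recursion structural (27 > 26 vertices, never exhausted)
def dfsGo (adj : Fin 26 → List (Fin 26)) : Nat → Fin 26 → (Fin 26 → Int) → (Fin 26 → Int)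
  | 0, _, vis => vis
  | fuel+1, node, vis =>
      (adj node).foldl (fun v i => bselect (v i == 0) (dfsGo adj fuel i v) v)
        (upd vis node 1)

def detectCycle (src : Fin 26) (adj : Fin 26 → List (Fin 26)) (mark : Fin 26 → Int) : Int :=
  let vis := dfsGo adj 27 src (fun _ => 0)
  if (List.finRange 26).any (fun i => vis i == 0 && mark i == 1) then 0 else 1

def modelA (N : Int) (A : List String) : Int :=
  let st := buildA A
  if (List.finRange 26).any (fun i => st.2.2.1 i != st.2.2.2 i) then 0
  else detectCycle (letterIdx (firstChar (A.headD ""))) st.2.1 st.1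


-- loop body of B's first loop; state: (deg = out-in, seen)
def stepB (st : (Fin 26 → Int) × (Fin 26 → Bool)) (w : String) :
    (Fin 26 → Int) × (Fin 26 → Bool) :=
  let u := letterIdx (firstChar w)
  let v := letterIdx (lastChar w)
  let d1 := upd st.1 u (st.1 u + 1)
  (upd d1 v (d1 v - 1),
   upd (upd st.2 u true) v true)

def buildB (A : List String) : (Fin 26 → Int) × (Fin 26 → Bool) :=
  A.foldl stepB ((fun _ => 0), (fun _ => false))

-- body of one propagation step / one full pass over the word list
def stepP (v : Fin 26 → Bool) (w : String) : Fin 26 → Bool :=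
  bselect (v (letterIdx (firstChar w))) (upd v (letterIdx (lastChar w)) true) v

def passB (A : List String) (vis : Fin 26 → Bool) : Fin 26 → Bool := A.foldl stepP vis

def modelB (N : Int) (A : List String) : Int :=
  let st := buildB A
  if (List.finRange 26).any (fun i => st.1 i != 0) then 0
  else
    let vis0 := upd (fun _ => false) (letterIdx (firstChar (A.headD ""))) true
    let vis := (List.range 26).foldl (fun v _ => passB A v) vis0
    if (List.finRange 26).any (fun i => st.2 i && !vis i) then 0 else 1


theorem bselect_true {α : Type} (t e : α) : bselect true t e = t := rfl

theorem bselect_false {α : Type} (t e : α) : bselect false t e = e := rfl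

theorem upd_apply {α : Type} (f : Fin 26 → α) (j i : Fin 26) (x : α) :
    upd f j x i = if i = j then x else f i := rfl

theorem upd_self {α : Type} (f : Fin 26 → α) (j : Fin 26) (x : α) : upd f j x j = x := by
  simp [upd]

-- generic foldl invariant
theorem foldl_inv {α β : Type} {P : β → Prop} :
    ∀ (l : List α) (f : β → α → β) (b : β), P b → (∀ b a, a ∈ l → P b → P (f b a)) →
      P (l.foldl f b) := by
  intro l
  induction l with
  | nil => intro f b h _; exact h
  | cons x xs ih =>
    intro f b h hs
    exact ih f (f b x) (hs b x (by simp) h) (fun b a ha => hs b a (by simp [ha]))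

theorem list_any_congr {α : Type} {p q : α → Bool} :
    ∀ (l : List α), (∀ a ∈ l, p a = q a) → l.any p = l.any q := by
  intro l
  induction l with
  | nil => intro _; rfl
  | cons x xs ih =>
    intro h
    simp only [List.any_cons, h x (by simp), ih (fun a ha => h a (by simp [ha]))]

-- the directed edge relation of the word list
def stepE (A : List String) (u v : Fin 26) : Prop :=
  ∃ w ∈ A, letterIdx (firstChar w) = u ∧ letterIdx (lastChar w) = v

def ReachE (A : List String) : Fin 26 → Fin 26 → Prop := Relation.ReflTransGen (stepE A)

-- ---------- A side: dfs computes reachability ----------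

def stepAdj (adj : Fin 26 → List (Fin 26)) (u v : Fin 26) : Prop := v ∈ adj u

def zerosV (v : Fin 26 → Int) : Nat := (Finset.univ.filter (fun i => v i = 0)).card

theorem zerosV_le {v v' : Fin 26 → Int} (h : ∀ i, v i ≠ 0 → v' i ≠ 0) : zerosV v' ≤ zerosV v := by
  apply Finset.card_le_card
  intro i hi
  simp only [Finset.mem_filter, Finset.mem_univ, true_and] at *
  by_contra hv
  exact h i hv hi

theorem zerosV_update {v : Fin 26 → Int} {node : Fin 26} (h : v node = 0) :
    zerosV (upd v node 1) + 1 = zerosV v := by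
  have hmem : node ∈ Finset.univ.filter (fun i => v i = 0) := by simp [h]
  have hset : Finset.univ.filter (fun i => upd v node 1 i = 0)
      = (Finset.univ.filter (fun i => v i = 0)).erase node := by
    ext i
    by_cases hi : i = node <;> simp [upd_apply, hi]
  have hpos : 0 < (Finset.univ.filter (fun i => v i = 0)).card :=
    Finset.card_pos.mpr ⟨node, hmem⟩
  unfold zerosV
  rw [hset, Finset.card_erase_of_mem hmem]
  omega

theorem zerosV_pos {v : Fin 26 → Int} {node : Fin 26} (h : v node = 0) : 1 ≤ zerosV v := by
  have hmem : node ∈ Finset.univ.filter (fun i => v i = 0) := by simp [h]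
  exact Finset.card_pos.mpr ⟨node, hmem⟩

theorem dfs_mono (adj : Fin 26 → List (Fin 26)) :
    ∀ fuel node vis i, vis i ≠ 0 → dfsGo adj fuel node vis i ≠ 0 := by
  intro fuel
  induction fuel with
  | zero => intro node vis i h; simpa [dfsGo] using h
  | succ f ih =>
    intro node vis i h
    simp only [dfsGo]
    have h0 : ∀ j, vis j ≠ 0 → upd vis node 1 j ≠ 0 := by
      intro j hj
      by_cases hjn : j = node <;> simp [upd_apply, hjn, hj]
    refine foldl_inv (P := fun v => ∀ j, vis j ≠ 0 → v j ≠ 0) (adj node)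
      (fun v i => bselect (v i == 0) (dfsGo adj f i v) v) (upd vis node 1) h0
      ?_ i h
    intro v a _ hv
    by_cases hva : v a = 0
    · simp only [show (v a == 0) = true by simp [hva], bselect_true]
      intro j hj; exact ih a v j (hv j hj)
    · simp only [show (v a == 0) = false by simp [hva], bselect_false]
      exact hv

-- fold part of the main dfs lemma, with the fuel induction hypothesis as an argument
theorem dfs_fold (adj : Fin 26 → List (Fin 26)) (f : Nat)
    (IH : ∀ node vis, vis node = 0 → zerosV vis ≤ f →
      ((dfsGo adj f node vis) node ≠ 0) ∧
      (∀ j ∈ adj node, (dfsGo adj f node vis) j ≠ 0) ∧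
      (∀ i, (dfsGo adj f node vis) i ≠ 0 → vis i ≠ 0 ∨ Relation.ReflTransGen (stepAdj adj) node i) ∧
      (∀ i, (dfsGo adj f node vis) i ≠ 0 → vis i = 0 →
        ∀ j ∈ adj i, (dfsGo adj f node vis) j ≠ 0))
    (node : Fin 26) (vis : Fin 26 → Int) :
    ∀ (l : List (Fin 26)), (∀ j ∈ l, j ∈ adj node) →
    ∀ (v : Fin 26 → Int),
      v node ≠ 0 →
      (∀ i, v i ≠ 0 → vis i ≠ 0 ∨ Relation.ReflTransGen (stepAdj adj) node i) →
      (∀ i, v i ≠ 0 → vis i = 0 → i ≠ node → ∀ j ∈ adj i, v j ≠ 0) →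
      zerosV v + 1 ≤ zerosV vis →
      zerosV vis ≤ f + 1 →
      (∀ i, v i ≠ 0 →
        (l.foldl (fun v i => bselect (v i == 0) (dfsGo adj f i v) v) v) i ≠ 0) ∧
      (∀ j ∈ l, (l.foldl (fun v i => bselect (v i == 0) (dfsGo adj f i v) v) v) j ≠ 0) ∧
      (∀ i, (l.foldl (fun v i => bselect (v i == 0) (dfsGo adj f i v) v) v) i ≠ 0 →
        vis i ≠ 0 ∨ Relation.ReflTransGen (stepAdj adj) node i) ∧
      (∀ i, (l.foldl (fun v i => bselect (v i == 0) (dfsGo adj f i v) v) v) i ≠ 0 → vis i = 0 →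
        i ≠ node → ∀ j ∈ adj i,
          (l.foldl (fun v i => bselect (v i == 0) (dfsGo adj f i v) v) v) j ≠ 0) ∧
      zerosV (l.foldl (fun v i => bselect (v i == 0) (dfsGo adj f i v) v) v) + 1 ≤ zerosV vis := by
  intro l
  induction l with
  | nil =>
    intro _ v hnode hsound hclosed hz _
    exact ⟨fun i hi => hi, by simp, hsound, fun i hi hvi hin => hclosed i hi hvi hin, hz⟩
  | cons j l' ihl =>
    intro hsub v hnode hsound hclosed hz hzf
    have hjadj : j ∈ adj node := hsub j (by simp)
    by_cases hvj : v j = 0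
    · -- recursive call on j
      have hzv : zerosV v ≤ f := by omega
      obtain ⟨d1, d2, d3, d4⟩ := IH j v hvj hzv
      set d := dfsGo adj f j v with hd
      have hmono : ∀ i, v i ≠ 0 → d i ≠ 0 := fun i hi => dfs_mono adj f j v i hi
      have hreachj : Relation.ReflTransGen (stepAdj adj) node j :=
        Relation.ReflTransGen.single hjadj
      have hsound' : ∀ i, d i ≠ 0 → vis i ≠ 0 ∨ Relation.ReflTransGen (stepAdj adj) node i := by
        intro i hi
        rcases d3 i hi with hvi | hr
        · exact hsound i hvi
        · exact Or.inr (hreachj.trans hr)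
      have hclosed' : ∀ i, d i ≠ 0 → vis i = 0 → i ≠ node → ∀ k ∈ adj i, d k ≠ 0 := by
        intro i hi hvisi hin k hk
        by_cases hvi : v i = 0
        · exact d4 i hi hvi k hk
        · exact hmono k (hclosed i hvi hvisi hin k hk)
      have hz' : zerosV d + 1 ≤ zerosV vis := le_trans (by have := zerosV_le hmono; omega) hz
      obtain ⟨r1, r2, r3, r4, r5⟩ :=
        ihl (fun k hk => hsub k (by simp [hk])) d (hmono node hnode) hsound' hclosed' hz' hzf
      refine ⟨?_, ?_, ?_, ?_, ?_⟩ <;>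
        simp only [List.foldl_cons, show (v j == 0) = true by simp [hvj], bselect_true, ← hd]
      · exact fun i hi => r1 i (hmono i hi)
      · intro k hk
        rcases List.mem_cons.mp hk with hk | hk
        · exact hk ▸ r1 j d1
        · exact r2 k hk
      · exact r3
      · exact r4
      · exact r5
    · -- j already visited: step is the identity
      obtain ⟨r1, r2, r3, r4, r5⟩ := ihl (fun k hk => hsub k (by simp [hk])) v hnode hsound hclosed hz hzf
      refine ⟨?_, ?_, ?_, ?_, ?_⟩ <;>
        simp only [List.foldl_cons, show (v j == 0) = false by simp [hvj], bselect_false]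
      · exact r1
      · intro k hk
        rcases List.mem_cons.mp hk with hk | hk
        · exact hk ▸ r1 j hvj
        · exact r2 k hk
      · exact r3
      · exact r4
      · exact r5

-- main dfs lemma: from an unvisited node with enough fuel, dfs marks the node and all its
-- successors, marks only reachable vertices, and newly marked vertices are closed under adj
theorem dfs_main (adj : Fin 26 → List (Fin 26)) :
    ∀ fuel node vis, vis node = 0 → zerosV vis ≤ fuel →
      ((dfsGo adj fuel node vis) node ≠ 0) ∧
      (∀ j ∈ adj node, (dfsGo adj fuel node vis) j ≠ 0) ∧
      (∀ i, (dfsGo adj fuel node vis) i ≠ 0 → vis i ≠ 0 ∨ Relation.ReflTransGen (stepAdj adj) node i) ∧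
      (∀ i, (dfsGo adj fuel node vis) i ≠ 0 → vis i = 0 →
        ∀ j ∈ adj i, (dfsGo adj fuel node vis) j ≠ 0) := by
  intro fuel
  induction fuel with
  | zero =>
    intro node vis h hz
    exact absurd (le_trans (zerosV_pos h) hz) (by omega)
  | succ f ih =>
    intro node vis h hz
    have hupd : ∀ i, upd vis node 1 i ≠ 0 → vis i ≠ 0 ∨
        Relation.ReflTransGen (stepAdj adj) node i := by
      intro i hi
      by_cases hin : i = node
      · exact Or.inr (hin ▸ Relation.ReflTransGen.refl)
      · rw [upd_apply, if_neg hin] at hi; exact Or.inl hi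
    have hcl : ∀ i, upd vis node 1 i ≠ 0 → vis i = 0 → i ≠ node →
        ∀ j ∈ adj i, upd vis node 1 j ≠ 0 := by
      intro i hi hvi hin
      rw [upd_apply, if_neg hin] at hi
      exact absurd hvi hi
    have hznew : zerosV (upd vis node 1) + 1 ≤ zerosV vis := by
      rw [zerosV_update h]
    obtain ⟨r1, r2, r3, r4, r5⟩ := dfs_fold adj f ih node vis (adj node) (fun _ hj => hj)
      (upd vis node 1) (by simp [upd_self]) hupd hcl hznew hz
    have hres : dfsGo adj (f+1) node vis =
        (adj node).foldl (fun v i => bselect (v i == 0) (dfsGo adj f i v) v)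
          (upd vis node 1) := by
      simp only [dfsGo]
    rw [hres]
    refine ⟨r1 node (by simp [upd_self]), r2, r3, ?_⟩
    intro i hi hvi j hj
    by_cases hin : i = node
    · exact r2 j (hin ▸ hj)
    · exact r4 i hi hvi hin j hj

theorem dfs_reach (adj : Fin 26 → List (Fin 26)) (src : Fin 26) :
    ∀ i, (dfsGo adj 27 src (fun _ => 0)) i ≠ 0 ↔ Relation.ReflTransGen (stepAdj adj) src i := by
  have hz : zerosV (fun _ : Fin 26 => (0 : Int)) ≤ 27 := by
    unfold zerosV
    exact le_trans (Finset.card_le_card (Finset.filter_subset _ _)) (by simp)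
  obtain ⟨m1, m2, m3, m4⟩ := dfs_main adj 27 src (fun _ => 0) rfl hz
  intro i
  constructor
  · intro hi
    rcases m3 i hi with hvi | hr
    · exact absurd rfl hvi
    · exact hr
  · intro hr
    induction hr with
    | refl => exact m1
    | tail hab hbc ihb => exact m4 _ ihb rfl _ hbc

-- ---------- buildA / buildB correspondence ----------

theorem build_corr_gen (A : List String) :
    ∀ (sA : (Fin 26 → Int) × (Fin 26 → List (Fin 26)) × (Fin 26 → Int) × (Fin 26 → Int))
      (sB : (Fin 26 → Int) × (Fin 26 → Bool)),
      (∀ i, sB.1 i = sA.2.2.2 i - sA.2.2.1 i) →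
      (∀ i, sB.2 i = decide (sA.1 i = 1)) →
      (∀ i, (A.foldl stepB sB).1 i = (A.foldl stepA sA).2.2.2 i - (A.foldl stepA sA).2.2.1 i) ∧
      (∀ i, (A.foldl stepB sB).2 i = decide ((A.foldl stepA sA).1 i = 1)) := by
  induction A with
  | nil => intro sA sB h1 h2; exact ⟨h1, h2⟩
  | cons w A ih =>
    intro sA sB h1 h2
    simp only [List.foldl_cons]
    apply ih
    · intro i
      simp only [stepA, stepB, upd_apply]
      have Hu := h1 (letterIdx (firstChar w))
      have Hi := h1 i
      by_cases hiv : i = letterIdx (lastChar w)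
      · rw [← hiv]
        by_cases hiu : i = letterIdx (firstChar w)
        · rw [← hiu]
          simp only [if_true]
          omega
        · simp [hiu]
          omega
      · by_cases hiu : i = letterIdx (firstChar w)
        · rw [← hiu]
          simp [hiv]
          omega
        · simp [hiv, hiu]
          omega
    · intro i
      simp only [stepA, stepB, upd_apply]
      by_cases hiv : i = letterIdx (lastChar w) <;>
        by_cases hiu : i = letterIdx (firstChar w) <;>
        simp [hiv, hiu, h2 i]

theorem build_corr (A : List String) :
    (∀ i, (buildB A).1 i = (buildA A).2.2.2 i - (buildA A).2.2.1 i) ∧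
    (∀ i, (buildB A).2 i = decide ((buildA A).1 i = 1)) := by
  exact build_corr_gen A _ _ (fun _ => rfl) (fun _ => rfl)

theorem buildA_adj_gen (A : List String) :
    ∀ (sA : (Fin 26 → Int) × (Fin 26 → List (Fin 26)) × (Fin 26 → Int) × (Fin 26 → Int))
      (u v : Fin 26),
      (v ∈ (A.foldl stepA sA).2.1 u ↔ v ∈ sA.2.1 u ∨ stepE A u v) := by
  induction A with
  | nil => intro sA u v; simp [stepE]
  | cons w A ih =>
    intro sA u v
    simp only [List.foldl_cons]
    rw [ih]
    have hstep : v ∈ (stepA sA w).2.1 u ↔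
        v ∈ sA.2.1 u ∨ (letterIdx (firstChar w) = u ∧ letterIdx (lastChar w) = v) := by
      simp only [stepA, upd_apply]
      by_cases hu : u = letterIdx (firstChar w)
      · subst hu; simp [eq_comm]
      · rw [if_neg hu]
        constructor
        · exact Or.inl
        · rintro (h | ⟨h1', h2'⟩)
          · exact h
          · exact absurd h1'.symm hu
    rw [hstep]
    simp only [stepE, List.mem_cons]
    constructor
    · rintro ((h | h) | ⟨w', hw', h⟩)
      · exact Or.inl h
      · exact Or.inr ⟨w, Or.inl rfl, h⟩
      · exact Or.inr ⟨w', Or.inr hw', h⟩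
    · rintro (h | ⟨w', (rfl | hw'), h⟩)
      · exact Or.inl (Or.inl h)
      · exact Or.inl (Or.inr h)
      · exact Or.inr ⟨w', hw', h⟩

theorem buildA_adj (A : List String) (u v : Fin 26) :
    v ∈ (buildA A).2.1 u ↔ stepE A u v := by
  have := buildA_adj_gen A ((fun _ => 0), (fun _ => []), (fun _ => 0), (fun _ => 0)) u v
  simpa [buildA] using this

theorem adj_rel_eq (A : List String) : stepAdj (buildA A).2.1 = stepE A := by
  funext u v
  exact propext (buildA_adj A u v)

-- ---------- B side: label propagation computes reachability ----------

theorem foldP_ext (l : List String) : ∀ (vis : Fin 26 → Bool) i, vis i = true →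
    (l.foldl stepP vis) i = true := by
  intro vis i h
  refine foldl_inv (P := fun v => ∀ j, vis j = true → v j = true) l stepP vis
    (fun _ h => h) ?_ i h
  intro v w _ hv j hj
  simp only [stepP]
  by_cases hc : v (letterIdx (firstChar w)) = true
  · rw [hc, bselect_true]
    by_cases hj' : j = letterIdx (lastChar w) <;>
      simp [upd_apply, hj', hv j hj]
  · have hcf : v (letterIdx (firstChar w)) = false := by simpa using hc
    rw [hcf, bselect_false]
    exact hv j hj

theorem pass_sound (A : List String) (src : Fin 26) (vis : Fin 26 → Bool)
    (h : ∀ i, vis i = true → ReachE A src i) :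
    ∀ i, passB A vis i = true → ReachE A src i := by
  intro i hi
  refine foldl_inv (P := fun v => ∀ j, v j = true → ReachE A src j) A stepP vis h ?_ i hi
  intro v w hw hv j hj
  simp only [stepP] at hj
  by_cases hc : v (letterIdx (firstChar w)) = true
  · rw [hc, bselect_true] at hj
    by_cases hj' : j = letterIdx (lastChar w)
    · subst hj'
      exact Relation.ReflTransGen.tail (hv _ hc) ⟨w, hw, rfl, rfl⟩
    · rw [upd_apply, if_neg hj'] at hj
      exact hv j hj
  · have hcf : v (letterIdx (firstChar w)) = false := by simpa using hc
    rw [hcf, bselect_false] at hj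
    exact hv j hj

theorem fold_fixed_closed : ∀ (l : List String) (vis : Fin 26 → Bool),
    l.foldl stepP vis = vis →
    ∀ w ∈ l, vis (letterIdx (firstChar w)) = true → vis (letterIdx (lastChar w)) = true := by
  intro l
  induction l with
  | nil => intro vis _ w hw; exact absurd hw (by simp)
  | cons w l' ih =>
    intro vis hfix w' hw'
    rw [List.foldl_cons] at hfix
    have hsub : ∀ i, stepP vis w i = true → vis i = true := by
      intro i hi
      have := foldP_ext l' (stepP vis w) i hi
      rwa [show l'.foldl stepP (stepP vis w) = vis from hfix] at this
    have hsup : ∀ i, vis i = true → stepP vis w i = true := by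
      intro i hi
      simp only [stepP]
      by_cases hc : vis (letterIdx (firstChar w)) = true
      · rw [hc, bselect_true]
        by_cases hj' : i = letterIdx (lastChar w) <;>
          simp [upd_apply, hj', hi]
      · have hcf : vis (letterIdx (firstChar w)) = false := by simpa using hc
        rw [hcf, bselect_false]
        exact hi
    have hstep : stepP vis w = vis := by
      funext i
      cases hvi : vis i with
      | true => exact hsup i hvi
      | false =>
        cases hsi : stepP vis w i with
        | true => rw [hsub i hsi] at hvi; simp at hvi
        | false => rfl
    rcases List.mem_cons.mp hw' with rfl | hw'
    · intro hfi
      have := congrFun hstep (letterIdx (lastChar w'))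
      simp only [stepP, hfi, bselect_true] at this
      rw [← this, upd_self]
    · intro hfi
      have hfix' : l'.foldl stepP vis = vis := by rwa [hstep] at hfix
      exact ih vis hfix' w' hw' hfi

def onesV (v : Fin 26 → Bool) : Nat := (Finset.univ.filter (fun i => v i = true)).card

theorem onesV_lt {v v' : Fin 26 → Bool} (hmono : ∀ i, v i = true → v' i = true)
    (hne : v' ≠ v) : onesV v < onesV v' := by
  apply Finset.card_lt_card
  constructor
  · intro i hi
    simp only [Finset.mem_filter, Finset.mem_univ, true_and] at *
    exact hmono i hi
  · intro hsub
    apply hne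
    funext i
    cases hvi : v i with
    | true => exact hmono i hvi
    | false =>
      cases hvi' : v' i with
      | true =>
        have : i ∈ Finset.univ.filter (fun i => v i = true) := by
          apply hsub; simp [hvi']
        simp [hvi] at this
      | false => rfl

theorem range_foldl_iterate (A : List String) :
    ∀ (n : Nat) (v : Fin 26 → Bool),
      (List.range n).foldl (fun v _ => passB A v) v = (passB A)^[n] v := by
  intro n
  induction n with
  | zero => intro v; rfl
  | succ n ih =>
    intro v
    rw [List.range_succ, List.foldl_append, ih, List.foldl_cons, List.foldl_nil,
      Function.iterate_succ_apply']

theorem iterate_ext (A : List String) : ∀ (n : Nat) (v : Fin 26 → Bool) i,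
    v i = true → ((passB A)^[n] v) i = true := by
  intro n
  induction n with
  | zero => intro v i h; exact h
  | succ n ih =>
    intro v i h
    rw [Function.iterate_succ_apply']
    exact foldP_ext A _ i (ih v i h)

theorem iterate_fix (A : List String) (v0 : Fin 26 → Bool) (src : Fin 26)
    (hsrc : v0 src = true) : passB A ((passB A)^[26] v0) = (passB A)^[26] v0 := by
  by_contra hne
  have hfixstay : ∀ k, passB A ((passB A)^[k] v0) = (passB A)^[k] v0 →
      ∀ m, (passB A)^[k+m] v0 = (passB A)^[k] v0 := by
    intro k hk m
    induction m with
    | zero => rfl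
    | succ m ihm => rw [← Nat.add_assoc, Function.iterate_succ_apply', ihm, hk]
  have hallne : ∀ k, k ≤ 26 → passB A ((passB A)^[k] v0) ≠ (passB A)^[k] v0 := by
    intro k hk hfix
    apply hne
    have h26 : (passB A)^[26] v0 = (passB A)^[k] v0 := by
      have := hfixstay k hfix (26 - k)
      rwa [show k + (26 - k) = 26 by omega] at this
    rw [h26, hfix]
  have hchain : ∀ k, k ≤ 26 → k + onesV v0 ≤ onesV ((passB A)^[k] v0) := by
    intro k
    induction k with
    | zero => intro _; simp
    | succ k ihk =>
      intro hk
      have hlt : onesV ((passB A)^[k] v0) < onesV ((passB A)^[k+1] v0) := by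
        rw [Function.iterate_succ_apply']
        exact onesV_lt (fun i hi => foldP_ext A _ i hi) (hallne k (by omega))
      have := ihk (by omega)
      omega
  have hone : 1 ≤ onesV v0 := by
    apply Finset.card_pos.mpr
    exact ⟨src, by simp [hsrc]⟩
  have hcap : onesV ((passB A)^[26] v0) ≤ 26 := by
    unfold onesV
    exact le_trans (Finset.card_le_card (Finset.filter_subset _ _)) (by simp)
  have := hchain 26 (le_refl _)
  omega

theorem iter_is_reach (A : List String) (src : Fin 26) :
    ∀ i, ((List.range 26).foldl (fun v _ => passB A v)
      (upd (fun _ => false) src true)) i = true ↔ ReachE A src i := by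
  intro i
  rw [range_foldl_iterate]
  set v0 : Fin 26 → Bool := upd (fun _ => false) src true with hv0
  have hsrc : v0 src = true := by simp [hv0, upd_self]
  constructor
  · -- soundness: iterate n preserves "everything true is reachable"
    have hsound : ∀ n, ∀ j, ((passB A)^[n] v0) j = true → ReachE A src j := by
      intro n
      induction n with
      | zero =>
        intro j hj
        simp only [Function.iterate_zero_apply] at hj
        by_cases hjs : j = src
        · exact hjs ▸ Relation.ReflTransGen.refl
        · rw [hv0, upd_apply, if_neg hjs] at hj
          exact absurd hj (by simp)
      | succ n ihn =>
        intro j hj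
        rw [Function.iterate_succ_apply'] at hj
        exact pass_sound A src _ ihn j hj
    exact hsound 26 i
  · -- completeness: the iterate is a fixpoint, hence closed under the edges
    intro hr
    have hfix := iterate_fix A v0 src hsrc
    have hclosed := fold_fixed_closed A ((passB A)^[26] v0) hfix
    induction hr with
    | refl => exact iterate_ext A 26 v0 src hsrc
    | tail hab hbc ihb =>
      obtain ⟨w, hw, hfw, hlw⟩ := hbc
      exact hlw ▸ hclosed w hw (hfw ▸ ihb)

-- ---------- assembling the two programs ----------

theorem cond1_eq (A : List String) :
    ((List.finRange 26).any fun i => (buildA A).2.2.1 i != (buildA A).2.2.2 i)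
      = ((List.finRange 26).any fun i => (buildB A).1 i != 0) := by
  apply list_any_congr
  intro i _
  rw [(build_corr A).1 i, Bool.eq_iff_iff]
  simp only [bne_iff_ne, ne_eq]
  omega

theorem cond2_eq (A : List String) (src : Fin 26) :
    ((List.finRange 26).any fun i =>
        (dfsGo (buildA A).2.1 27 src (fun _ => 0)) i == 0 && (buildA A).1 i == 1)
      = ((List.finRange 26).any fun i => (buildB A).2 i &&
          !(((List.range 26).foldl (fun v _ => passB A v)
              (upd (fun _ => false) src true)) i)) := by
  apply list_any_congr
  intro i _
  have hseen := (build_corr A).2 i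
  have hvis : (dfsGo (buildA A).2.1 27 src (fun _ => 0)) i ≠ 0 ↔
      ((List.range 26).foldl (fun v _ => passB A v)
        (upd (fun _ => false) src true)) i = true := by
    rw [dfs_reach, adj_rel_eq, iter_is_reach]
    exact Iff.rfl
  rw [hseen]
  by_cases hA : (dfsGo (buildA A).2.1 27 src (fun _ => 0)) i = 0
  · have hB : ((List.range 26).foldl (fun v _ => passB A v)
        (upd (fun _ => false) src true)) i = false := by
      cases h : ((List.range 26).foldl (fun v _ => passB A v)
        (upd (fun _ => false) src true)) i with
      | false => rfl
      | true => exact absurd (hvis.mpr h) (by simp [hA])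
    simp [hA, hB]
    by_cases hm : (buildA A).1 i = 1 <;> simp [hm]
  · have hB : ((List.range 26).foldl (fun v _ => passB A v)
        (upd (fun _ => false) src true)) i = true := hvis.mp hA
    simp [hA, hB]

theorem model_eq (N : Int) (A : List String) : modelA N A = modelB N A := by
  simp only [modelA, modelB, detectCycle]
  rw [cond1_eq, cond2_eq]

-- ---------- bridging the list-state ports to the functional models ----------

def view {α : Type} (d : α) (l : List α) : Fin 26 → α := fun i => l.getD i.val d

theorem view_set {α : Type} (d x : α) (l : List α) (h26 : l.length = 26) (j : Fin 26) :
    view d (l.set j.val x) = upd (view d l) j x := by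
  funext i
  simp only [view, upd, List.getD_eq_getElem?_getD]
  by_cases h : i = j
  · subst h
    rw [List.getElem?_set_self (by omega), if_pos rfl]
    rfl
  · have hne : j.val ≠ i.val := fun hc => h (Fin.ext hc.symm)
    rw [List.getElem?_set_ne hne, if_neg h]

theorem view_replicate {α : Type} (d x : α) : view d (List.replicate 26 x) = fun _ => x := by
  funext i
  simp only [view, List.getD_eq_getElem?_getD]
  rw [List.getElem?_replicate_of_lt i.isLt]
  rfl

-- A-side build bridge
theorem buildAL_bridge_gen :
    ∀ (A : List String) (sL : List Int × List (List (Fin 26)) × List Int × List Int)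
      (sF : (Fin 26 → Int) × (Fin 26 → List (Fin 26)) × (Fin 26 → Int) × (Fin 26 → Int)),
      sL.1.length = 26 → sL.2.1.length = 26 → sL.2.2.1.length = 26 → sL.2.2.2.length = 26 →
      view 0 sL.1 = sF.1 → view [] sL.2.1 = sF.2.1 → view 0 sL.2.2.1 = sF.2.2.1 →
      view 0 sL.2.2.2 = sF.2.2.2 →
      (A.foldl stepAL sL).1.length = 26 ∧ (A.foldl stepAL sL).2.1.length = 26 ∧
      (A.foldl stepAL sL).2.2.1.length = 26 ∧ (A.foldl stepAL sL).2.2.2.length = 26 ∧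
      view 0 (A.foldl stepAL sL).1 = (A.foldl stepA sF).1 ∧
      view [] (A.foldl stepAL sL).2.1 = (A.foldl stepA sF).2.1 ∧
      view 0 (A.foldl stepAL sL).2.2.1 = (A.foldl stepA sF).2.2.1 ∧
      view 0 (A.foldl stepAL sL).2.2.2 = (A.foldl stepA sF).2.2.2 := by
  intro A
  induction A with
  | nil => intro sL sF h1 h2 h3 h4 v1 v2 v3 v4; exact ⟨h1, h2, h3, h4, v1, v2, v3, v4⟩
  | cons w A ih =>
    intro sL sF h1 h2 h3 h4 v1 v2 v3 v4
    simp only [List.foldl_cons]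
    apply ih
    · simp [stepAL, h1]
    · simp [stepAL, h2]
    · simp [stepAL, h3]
    · simp [stepAL, h4]
    · simp only [stepAL, stepA]
      rw [view_set 0 1 _ (by simp [h1]) _, view_set 0 1 sL.1 h1 _, v1]
    · simp only [stepAL, stepA]
      have hg : sL.2.1.getD (letterIdx (firstChar w)).val [] = sF.2.1 (letterIdx (firstChar w)) :=
        congrFun v2 _
      rw [hg, view_set [] _ sL.2.1 h2 _, v2]
    · simp only [stepAL, stepA]
      have hg : sL.2.2.1.getD (letterIdx (lastChar w)).val 0 = sF.2.2.1 (letterIdx (lastChar w)) :=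
        congrFun v3 _
      rw [hg, view_set 0 _ sL.2.2.1 h3 _, v3]
    · simp only [stepAL, stepA]
      have hg : sL.2.2.2.getD (letterIdx (firstChar w)).val 0 = sF.2.2.2 (letterIdx (firstChar w)) :=
        congrFun v4 _
      rw [hg, view_set 0 _ sL.2.2.2 h4 _, v4]

-- B-side build bridge
theorem buildBL_bridge_gen :
    ∀ (A : List String) (sL : List Int × List Bool) (sF : (Fin 26 → Int) × (Fin 26 → Bool)),
      sL.1.length = 26 → sL.2.length = 26 →
      view 0 sL.1 = sF.1 → view false sL.2 = sF.2 →
      (A.foldl stepBL sL).1.length = 26 ∧ (A.foldl stepBL sL).2.length = 26 ∧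
      view 0 (A.foldl stepBL sL).1 = (A.foldl stepB sF).1 ∧
      view false (A.foldl stepBL sL).2 = (A.foldl stepB sF).2 := by
  intro A
  induction A with
  | nil => intro sL sF h1 h2 v1 v2; exact ⟨h1, h2, v1, v2⟩
  | cons w A ih =>
    intro sL sF h1 h2 v1 v2
    simp only [List.foldl_cons]
    apply ih
    · simp [stepBL, h1]
    · simp [stepBL, h2]
    · simp only [stepBL, stepB]
      have hu : sL.1.getD (letterIdx (firstChar w)).val 0 = sF.1 (letterIdx (firstChar w)) :=
        congrFun v1 _
      have e1 : view 0 (sL.1.set (letterIdx (firstChar w)).val (sL.1.getD (letterIdx (firstChar w)).val 0 + 1))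
          = upd sF.1 (letterIdx (firstChar w)) (sF.1 (letterIdx (firstChar w)) + 1) := by
        rw [view_set 0 _ sL.1 h1 _, v1, hu]
      rw [view_set 0 _ _ (by simp [h1]) _, e1]
      rw [show (sL.1.set (letterIdx (firstChar w)).val
            (sL.1.getD (letterIdx (firstChar w)).val 0 + 1)).getD (letterIdx (lastChar w)).val 0
          = upd sF.1 (letterIdx (firstChar w)) (sF.1 (letterIdx (firstChar w)) + 1)
              (letterIdx (lastChar w)) from congrFun e1 _]
    · simp only [stepBL, stepB]
      rw [view_set false _ _ (by simp [h2]) _, view_set false _ sL.2 h2 _, v2]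

-- dfs bridge
theorem dfsGoL_len (adj : List (List (Fin 26))) :
    ∀ fuel node vis, (dfsGoL adj fuel node vis).length = vis.length := by
  intro fuel
  induction fuel with
  | zero => intro node vis; rfl
  | succ f ih =>
    intro node vis
    simp only [dfsGoL]
    refine foldl_inv (P := fun v : List Int => v.length = vis.length) _ _ _ (by simp) ?_
    intro v a _ hv
    by_cases hc : v.getD a.val 0 = 0
    · rw [if_pos hc, ih a v]; exact hv
    · rw [if_neg hc]; exact hv

theorem dfs_bridge (adjL : List (List (Fin 26))) :
    ∀ fuel node vis, vis.length = 26 →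
      view 0 (dfsGoL adjL fuel node vis) = dfsGo (view [] adjL) fuel node (view 0 vis) := by
  intro fuel
  induction fuel with
  | zero => intro node vis _; rfl
  | succ f ih =>
    intro node vis h26
    simp only [dfsGoL, dfsGo]
    have main : ∀ (l : List (Fin 26)) (vL : List Int), vL.length = 26 →
        view 0 (l.foldl (fun v i => if v.getD i.val 0 = 0 then dfsGoL adjL f i v else v) vL)
          = l.foldl (fun v i => bselect (v i == 0) (dfsGo (view [] adjL) f i v) v) (view 0 vL) := by
      intro l
      induction l with
      | nil => intro vL _; rfl
      | cons a l' ihl =>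
        intro vL hL
        simp only [List.foldl_cons]
        by_cases hc : vL.getD a.val 0 = 0
        · have hcF : ((view 0 vL) a == 0) = true := by
            simp only [view]; rw [hc]; rfl
          rw [if_pos hc]
          simp only [hcF, bselect_true]
          rw [ihl _ (by rw [dfsGoL_len]; exact hL), ih a vL hL]
        · have hcF : ((view 0 vL) a == 0) = false := by
            simp only [view]; rw [beq_eq_false_iff_ne]; exact hc
          rw [if_neg hc]
          simp only [hcF, bselect_false]
          exact ihl vL hL
    rw [main _ _ (by simp [h26]), view_set 0 1 vis h26 node]
    rfl

-- pass / iteration bridge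
theorem passBL_bridge_gen :
    ∀ (l : List String) (vL : List Bool), vL.length = 26 →
      view false (l.foldl stepPL vL) = l.foldl stepP (view false vL) ∧
        (l.foldl stepPL vL).length = 26 := by
  intro l
  induction l with
  | nil => intro vL h; exact ⟨rfl, h⟩
  | cons w l' ihl =>
    intro vL h
    simp only [List.foldl_cons]
    have hstep : view false (stepPL vL w) = stepP (view false vL) w ∧
        (stepPL vL w).length = 26 := by
      simp only [stepPL, stepP]
      by_cases hc : vL.getD (letterIdx (firstChar w)).val false = true
      · have hcF : (view false vL) (letterIdx (firstChar w)) = true := hc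
        rw [if_pos hc, hcF, bselect_true]
        exact ⟨view_set false true vL h _, by simp [h]⟩
      · have hcF : (view false vL) (letterIdx (firstChar w)) = false := by
          simp only [view]; simpa using hc
        rw [if_neg hc, hcF, bselect_false]
        exact ⟨rfl, h⟩
    obtain ⟨ih1, ih2⟩ := ihl (stepPL vL w) hstep.2
    exact ⟨by rw [ih1, hstep.1], ih2⟩

theorem passBL_bridge (A : List String) (vL : List Bool) (h : vL.length = 26) :
    view false (passBL A vL) = passB A (view false vL) ∧ (passBL A vL).length = 26 :=
  passBL_bridge_gen A vL h

theorem iterL_bridge (A : List String) :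
    ∀ (n : Nat) (vL : List Bool), vL.length = 26 →
      view false ((List.range n).foldl (fun v _ => passBL A v) vL)
        = (List.range n).foldl (fun v _ => passB A v) (view false vL) := by
  intro n
  induction n with
  | zero => intro vL _; rfl
  | succ n ihn =>
    intro vL h
    rw [List.range_succ, List.foldl_append, List.foldl_append]
    simp only [List.foldl_cons, List.foldl_nil]
    have hX : ((List.range n).foldl (fun v _ => passBL A v) vL).length = 26 := by
      refine foldl_inv (P := fun v : List Bool => v.length = 26) _ _ _ h ?_
      intro v a _ hv
      exact (passBL_bridge A v hv).2
    rw [← ihn vL h]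
    exact (passBL_bridge A _ hX).1

theorem portA_eq_modelA (N : Int) (A : List String) : can_form_circle N A = modelA N A := by
  obtain ⟨l1, l2, l3, l4, e1, e2, e3, e4⟩ :=
    buildAL_bridge_gen A
      (List.replicate 26 0, List.replicate 26 [], List.replicate 26 0, List.replicate 26 0)
      ((fun _ => 0), (fun _ => []), (fun _ => 0), (fun _ => 0))
      (by simp) (by simp) (by simp) (by simp)
      (view_replicate _ _) (view_replicate _ _) (view_replicate _ _) (view_replicate _ _)
  have hc1 : ((List.finRange 26).any fun i =>
        (buildAL A).2.2.1.getD i.val 0 != (buildAL A).2.2.2.getD i.val 0)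
      = ((List.finRange 26).any fun i => (buildA A).2.2.1 i != (buildA A).2.2.2 i) := by
    apply list_any_congr
    intro i _
    simp only [buildAL, buildA]
    rw [← congrFun e3 i, ← congrFun e4 i]
    rfl
  have ev : view 0 (dfsGoL (buildAL A).2.1 27 (letterIdx (firstChar (A.headD "")))
        (List.replicate 26 0))
      = dfsGo (buildA A).2.1 27 (letterIdx (firstChar (A.headD ""))) (fun _ => 0) := by
    simp only [buildAL, buildA]
    rw [dfs_bridge _ 27 _ _ (by simp), view_replicate, e2]
  have hc2 : ((List.finRange 26).any fun i =>
        (dfsGoL (buildAL A).2.1 27 (letterIdx (firstChar (A.headD "")))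
          (List.replicate 26 0)).getD i.val 0 == 0 && (buildAL A).1.getD i.val 0 == 1)
      = ((List.finRange 26).any fun i =>
        (dfsGo (buildA A).2.1 27 (letterIdx (firstChar (A.headD ""))) (fun _ => 0)) i == 0 &&
        (buildA A).1 i == 1) := by
    apply list_any_congr
    intro i _
    rw [← congrFun ev i]
    simp only [buildAL, buildA]
    rw [← congrFun e1 i]
    rfl
  simp only [can_form_circle, modelA, detectCycleL, detectCycle]
  simp only [hc1, hc2]

theorem portB_eq_modelB (N : Int) (A : List String) : can_form_circle_alt N A = modelB N A := by
  obtain ⟨l1, l2, e1, e2⟩ :=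
    buildBL_bridge_gen A (List.replicate 26 0, List.replicate 26 false)
      ((fun _ => 0), (fun _ => false))
      (by simp) (by simp) (view_replicate _ _) (view_replicate _ _)
  have hc1 : ((List.finRange 26).any fun i => (buildBL A).1.getD i.val 0 != 0)
      = ((List.finRange 26).any fun i => (buildB A).1 i != 0) := by
    apply list_any_congr
    intro i _
    simp only [buildBL, buildB]
    rw [← congrFun e1 i]
    rfl
  have ev0 : view false ((List.replicate 26 false).set
        (letterIdx (firstChar (A.headD ""))).val true)
      = upd (fun _ => false) (letterIdx (firstChar (A.headD ""))) true := by
    rw [view_set false true _ (by simp) _, view_replicate]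
  have evis : view false ((List.range 26).foldl (fun v _ => passBL A v)
        ((List.replicate 26 false).set (letterIdx (firstChar (A.headD ""))).val true))
      = (List.range 26).foldl (fun v _ => passB A v)
        (upd (fun _ => false) (letterIdx (firstChar (A.headD ""))) true) := by
    rw [iterL_bridge A 26 _ (by simp), ev0]
  have hc2 : ((List.finRange 26).any fun i =>
        (buildBL A).2.getD i.val false &&
        !(((List.range 26).foldl (fun v _ => passBL A v)
          ((List.replicate 26 false).set (letterIdx (firstChar (A.headD ""))).val true)).getD
            i.val false))
      = ((List.finRange 26).any fun i =>
        (buildB A).2 i &&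
        !(((List.range 26).foldl (fun v _ => passB A v)
          (upd (fun _ => false) (letterIdx (firstChar (A.headD ""))) true)) i)) := by
    apply list_any_congr
    intro i _
    rw [← congrFun evis i]
    simp only [buildBL, buildB]
    rw [← congrFun e2 i]
    rfl
  simp only [can_form_circle_alt, modelB]
  simp only [hc1, hc2]

-- ===== VERDICT (by name: the statement is the Claim_ definition above) =====
theorem can_form_circle_spec : Claim_equal_can_form_circle := by
  intro N A _ _
  show can_form_circle N A = can_form_circle_alt N A
  rw [portA_eq_modelA, portB_eq_modelB, model_eq]
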